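-- pv_equiv track=rewrite | github.com/kartikeysingh6/kartik_python | Sorting Visualizer/sortingAlgos.py | ColorArrIns
-- ===== SOURCE A (Python) =====
-- lightRed='#FF7F7F'
--
-- def ColorArrIns(data,hole):
-- 	clrarr=[]
-- 	for i in range(len(data)):
-- 		if i<hole and i>=0:
-- 			clrarr.append('lightgreen')
-- 		else:
-- 			clrarr.append(lightRed)
--
-- 		if i==hole:
-- 			clrarr[i]='blue'
--
-- 	return clrarr
-- ===== SOURCE B (Python) =====
-- lightRed = '#FF7F7F'
--
-- def ColorArrIns(data, hole):
--     n = len(data)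
--     g = max(0, min(hole, n))
--     res = ['lightgreen'] * g
--     if 0 <= hole < n:
--         res.append('blue')
--         res.extend([lightRed] * (n - hole - 1))
--     else:
--         res.extend([lightRed] * (n - g))
--     return res
-- ===== Notes on version B (the rewrite author's own statement) =====
-- stated objective: simpler
-- what changed: B builds the three color runs (green prefix, optional 'blue' marker, red tail) by list repetition and concatenation instead of A's index-by-index loop with a conditional and an in-place overwrite.
import Mathlib
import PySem

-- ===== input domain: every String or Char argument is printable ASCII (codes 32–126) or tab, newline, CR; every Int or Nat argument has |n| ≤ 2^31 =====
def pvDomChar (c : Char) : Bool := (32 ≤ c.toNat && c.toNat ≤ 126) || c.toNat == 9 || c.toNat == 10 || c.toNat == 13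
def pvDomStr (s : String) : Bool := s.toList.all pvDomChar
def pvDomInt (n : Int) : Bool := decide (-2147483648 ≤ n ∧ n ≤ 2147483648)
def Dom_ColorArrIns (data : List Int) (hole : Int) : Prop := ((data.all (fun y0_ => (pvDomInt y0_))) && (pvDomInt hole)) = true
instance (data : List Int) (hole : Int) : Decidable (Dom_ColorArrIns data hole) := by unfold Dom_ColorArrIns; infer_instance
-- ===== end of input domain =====

-- B builds the three color runs (green prefix, optional "blue" marker, red tail) by list
-- repetition and concatenation instead of A's index-by-index loop with a conditional and an
-- in-place overwrite; objective: simpler.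

-- ===== PORT A =====
-- module constant lightRed
def lightRed : String := "#FF7F7F"

def ColorArrIns (data : List Int) (hole : Int) : List String :=
  (PySem.List.pyRange 0 (data.length : Int) 1).foldl
    (fun clrarr i =>
      let clrarr := clrarr ++ [if i < hole ∧ 0 ≤ i then "lightgreen" else lightRed]
      if i == hole then clrarr.set i.toNat "blue" else clrarr)
    []

-- ===== PORT B =====
def ColorArrIns_alt (data : List Int) (hole : Int) : List String :=
  let n : Int := data.length
  let g : Int := max 0 (min hole n)
  let res : List String := List.replicate g.toNat "lightgreen"
  if 0 ≤ hole ∧ hole < n then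
    (res ++ ["blue"]) ++ List.replicate (n - hole - 1).toNat lightRed
  else
    res ++ List.replicate (n - g).toNat lightRed

-- ===== PRECONDITION & SPEC =====
def Spec_ColorArrIns (data : List Int) (hole : Int) (out : List String) : Prop := out = ColorArrIns_alt data hole
instance (data : List Int) (hole : Int) (out : List String) : Decidable (Spec_ColorArrIns data hole out) := by unfold Spec_ColorArrIns; infer_instance

-- ===== CLAIM (what is proved, stated in full; the proofs are below) =====
def Claim_equal_ColorArrIns : Prop := ∀ (data : List Int) (hole : Int), Dom_ColorArrIns data hole → Spec_ColorArrIns data hole (ColorArrIns data hole)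

-- ===== LEMMAS AND PROOFS =====

-- B's result expressed through the length only
def pvSegs (n : Nat) (hole : Int) : List String :=
  let g : Int := max 0 (min hole (n : Int))
  if 0 ≤ hole ∧ hole < (n : Int) then
    (List.replicate g.toNat "lightgreen" ++ ["blue"]) ++ List.replicate ((n : Int) - hole - 1).toNat lightRed
  else
    List.replicate g.toNat "lightgreen" ++ List.replicate ((n : Int) - g).toNat lightRed

theorem pvSegs_length (n : Nat) (hole : Int) : (pvSegs n hole).length = n := by
  unfold pvSegs
  split_ifs with h <;> simp <;> omega

theorem pvLoop_eq (hole : Int) (n : Nat) :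
    (PySem.List.pyRange 0 (n : Int) 1).foldl
      (fun clrarr i =>
        let clrarr := clrarr ++ [if i < hole ∧ 0 ≤ i then "lightgreen" else lightRed]
        if i == hole then clrarr.set i.toNat "blue" else clrarr)
      [] = pvSegs n hole := by
  induction n with
  | zero => simp [PySem.List.pyRange_one_eq_nil, pvSegs]
  | succ m ih =>
    have hr : PySem.List.pyRange 0 ((m + 1 : Nat) : Int) 1
        = PySem.List.pyRange 0 (m : Int) 1 ++ [(m : Int)] := by
      push_cast
      exact PySem.List.pyRange_one_succ_right (by exact_mod_cast Nat.zero_le m)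
    rw [hr, List.foldl_append, ih]
    simp only [List.foldl]
    by_cases hm : (m : Int) = hole
    · -- hole = m : the appended cell is overwritten with "blue"
      have hlen : (pvSegs m hole).length = m := pvSegs_length m hole
      have hseg : pvSegs m hole = List.replicate m "lightgreen" := by
        unfold pvSegs
        have h1 : ¬ (0 ≤ hole ∧ hole < (m : Int)) := by omega
        rw [if_neg h1]
        have h2 : max 0 (min hole (m : Int)) = (m : Int) := by omega
        rw [h2]
        simp
      have hcond : ¬ ((m : Int) < hole ∧ 0 ≤ (m : Int)) := by omega
      rw [if_neg hcond, if_pos (by exact beq_iff_eq.mpr hm)]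
      have htn : (m : Int).toNat = m := Int.toNat_natCast m
      rw [htn, hseg]
      have hset : (List.replicate m "lightgreen" ++ [lightRed]).set m "blue"
          = List.replicate m "lightgreen" ++ ["blue"] := by
        rw [List.set_append_right _ _ (by simp)]
        simp
      rw [hset]
      unfold pvSegs
      have h1 : 0 ≤ hole ∧ hole < ((m + 1 : Nat) : Int) := by constructor <;> omega
      rw [if_pos h1]
      have h2 : max 0 (min hole ((m + 1 : Nat) : Int)) = hole := by omega
      have h3 : (((m + 1 : Nat) : Int) - hole - 1).toNat = 0 := by omega
      rw [h2, h3, ← hm]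
      simp [htn]
    · rw [if_neg (by simpa using hm)]
      by_cases hlt : (m : Int) < hole
      · -- still in the green prefix
        have hcond : ((m : Int) < hole ∧ 0 ≤ (m : Int)) := ⟨hlt, by omega⟩
        rw [if_pos hcond]
        unfold pvSegs
        have h1 : ¬ (0 ≤ hole ∧ hole < (m : Int)) := by omega
        have h1' : ¬ (0 ≤ hole ∧ hole < ((m + 1 : Nat) : Int)) := by
          push_cast; omega
        rw [if_neg h1, if_neg h1']
        have h2 : max 0 (min hole (m : Int)) = (m : Int) := by omega
        have h2' : max 0 (min hole ((m + 1 : Nat) : Int)) = ((m + 1 : Nat) : Int) := by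
          push_cast; push_cast at *; omega
        rw [h2, h2']
        simp [List.replicate_succ']
      · -- past the hole (or hole negative): red tail grows by one
        have hcond : ¬ ((m : Int) < hole ∧ 0 ≤ (m : Int)) := by omega
        rw [if_neg hcond]
        unfold pvSegs
        by_cases h0 : 0 ≤ hole
        · have h1 : 0 ≤ hole ∧ hole < (m : Int) := by omega
          have h1' : 0 ≤ hole ∧ hole < ((m + 1 : Nat) : Int) := by push_cast; omega
          rw [if_pos h1, if_pos h1']
          have h3 : (((m + 1 : Nat) : Int) - hole - 1).toNat = ((m : Int) - hole - 1).toNat + 1 := by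
            push_cast; omega
          rw [h3, List.replicate_succ']
          simp
          omega
        · have h1 : ¬ (0 ≤ hole ∧ hole < (m : Int)) := by omega
          have h1' : ¬ (0 ≤ hole ∧ hole < ((m + 1 : Nat) : Int)) := by omega
          rw [if_neg h1, if_neg h1']
          have h2 : max 0 (min hole (m : Int)) = 0 := by omega
          have h2' : max 0 (min hole ((m + 1 : Nat) : Int)) = 0 := by omega
          rw [h2, h2']
          have h3 : (((m + 1 : Nat) : Int) - 0).toNat = ((m : Int) - 0).toNat + 1 := by
            push_cast; omega
          rw [h3, List.replicate_succ']
          simp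

theorem alt_eq_segs (data : List Int) (hole : Int) :
    ColorArrIns_alt data hole = pvSegs data.length hole := rfl

-- ===== VERDICT (by name: the statement is the Claim_ definition above) =====
theorem ColorArrIns_spec : Claim_equal_ColorArrIns := by
  intro data hole _
  unfold Spec_ColorArrIns ColorArrIns
  rw [alt_eq_segs]
  exact pvLoop_eq hole data.length
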